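-- pv_equiv track=rewrite | github.com/zzw4257/Seed-Network-Security-Skill | .experiments/MASFactory/masfactory/components/vibe/vibe_workflow/planner/diagnose_node.py | _dfs_many
-- ===== SOURCE A (Python) =====
-- def _dfs_many(roots: list[str], a: dict[str, list[str]]) -> set[str]:
--     seen: set[str] = set()
--     stack = list(roots)
--     while stack:
--         x = stack.pop()
--         if x in seen:
--             continue
--         seen.add(x)
--         for y in a.get(x, []):
--             if y not in seen:
--                 stack.append(y)
--     return seen
-- ===== SOURCE B (Python) =====
-- def _dfs_many(roots: list[str], a: dict[str, list[str]]) -> set[str]: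
--     # Recursive depth-first search: the call stack replaces the explicit
--     # worklist.  Roots and neighbor lists are walked in reverse, which is
--     # exactly the order the pop-from-the-end worklist explores them.
--     seen: set[str] = set()
--
--     def visit(x: str) -> None:
--         if x in seen:
--             return
--         seen.add(x)
--         for y in reversed(a.get(x, [])):
--             visit(y)
--
--     for r in reversed(roots):
--         visit(r)
--     return seen
-- ===== Notes on version B (the rewrite author's own statement) =====
-- stated objective: alternative
-- what changed: The explicit stack/worklist loop is replaced by a recursive DFS helper visit(x) that recurses over the neighbors (taken in reverse, the order the pop-from-the-end stack explores them), using the call stack instead of an explicit stack and doing away with stale duplicate stack entries.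
import Mathlib
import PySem

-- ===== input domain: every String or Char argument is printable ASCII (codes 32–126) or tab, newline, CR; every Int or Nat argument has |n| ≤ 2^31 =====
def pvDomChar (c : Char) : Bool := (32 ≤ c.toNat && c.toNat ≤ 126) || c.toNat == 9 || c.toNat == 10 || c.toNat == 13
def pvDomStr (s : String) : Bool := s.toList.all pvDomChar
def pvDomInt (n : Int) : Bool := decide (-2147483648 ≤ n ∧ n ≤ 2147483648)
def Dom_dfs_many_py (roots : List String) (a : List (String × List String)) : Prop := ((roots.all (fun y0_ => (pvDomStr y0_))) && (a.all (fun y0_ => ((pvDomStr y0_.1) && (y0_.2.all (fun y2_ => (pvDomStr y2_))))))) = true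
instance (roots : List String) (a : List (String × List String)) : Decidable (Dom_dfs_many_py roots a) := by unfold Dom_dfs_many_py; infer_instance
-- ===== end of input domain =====

-- B replaces A's explicit worklist loop by a recursive DFS helper (call-stack
-- recursion over the neighbors, walked in reverse = the order the pop-from-the-end
-- worklist explores them); same reachable set, same cost (objective: alternative).

-- shared type-convention helpers: the Python dict argument, its lookups, and the
-- fuel used only as termination plumbing (proved sufficient below)
def pvAdj (a : List (String × List String)) : PySem.Dict String (List String) := PySem.Dict.ofList a
def pvNbrs (a : List (String × List String)) (x : String) : List String := (pvAdj a).getD x []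
def pvFuel (roots : List String) (a : List (String × List String)) : Nat :=
  roots.length + (((pvAdj a).values).map List.length).sum + 1

-- ===== PORT A =====
def pvLoopA (a : List (String × List String)) : Nat → PySem.Set String → List String → PySem.Set String
  | 0, seen, _ => seen
  | Nat.succ f, seen, stack =>
    match PySem.List.pop? stack with
    | none => seen            -- stack empty: "while stack" exits
    | some (x, rest) =>
      if PySem.Set.contains seen x then pvLoopA a f seen rest
      else
        let seen' := PySem.Set.add seen x
        pvLoopA a f seen'
          ((pvNbrs a x).foldl (fun st y => if !(PySem.Set.contains seen' y) then st ++ [y] else st) rest)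

def dfs_many_py (roots : List String) (a : List (String × List String)) : List String :=
  pvLoopA a (pvFuel roots a) PySem.Set.empty roots

-- ===== PORT B =====
mutual
def pvVisit (a : List (String × List String)) (f : Nat) (x : String) (seen : PySem.Set String) : PySem.Set String :=
  match f with
  | 0 => seen
  | Nat.succ f' =>
    if PySem.Set.contains seen x then seen
    else pvVisitList a f' ((pvNbrs a x).reverse) (PySem.Set.add seen x)
termination_by (f, 0)

def pvVisitList (a : List (String × List String)) (f : Nat) (l : List String) (seen : PySem.Set String) : PySem.Set String :=
  match l with
  | [] => seen
  | y :: ys => pvVisitList a f ys (pvVisit a f y seen)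
termination_by (f, l.length + 1)
end

def dfs_many_py_alt (roots : List String) (a : List (String × List String)) : List String :=
  pvVisitList a (pvFuel roots a) roots.reverse PySem.Set.empty

-- ===== PRECONDITION & SPEC =====
def Spec_dfs_many_py (roots : List String) (a : List (String × List String)) (out : List String) : Prop := out = dfs_many_py_alt roots a
instance (roots : List String) (a : List (String × List String)) (out : List String) : Decidable (Spec_dfs_many_py roots a out) := by unfold Spec_dfs_many_py; infer_instance

-- ===== CLAIM (what is proved, stated in full; the proofs are below) =====
def Claim_equal_dfs_many_py : Prop := ∀ (roots : List String) (a : List (String × List String)), Dom_dfs_many_py roots a → Spec_dfs_many_py roots a (dfs_many_py roots a)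

-- ===== LEMMAS AND PROOFS =====

-- number of universe elements not yet seen (the recursion measure)
def pvUnseen (U : List String) (s : PySem.Set String) : Nat :=
  U.countP (fun u => !(PySem.Set.contains s u))

-- remaining adjacency budget: total length of the neighbor lists of unseen keys
def pvBudget (a : List (String × List String)) (s : PySem.Set String) : Nat :=
  ((((pvAdj a).keys).filter (fun k => !(PySem.Set.contains s k))).map (fun k => (pvNbrs a k).length)).sum

lemma pv_contains_append (s : List String) (x u : String) :
    PySem.Set.contains (s ++ [x]) u = (PySem.Set.contains s u || u == x) := by
  simp [PySem.Set.contains_eq_listContains, Bool.beq_eq_decide_eq]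

lemma pv_not_mem_of_contains_false {s : PySem.Set String} {x : String}
    (hc : PySem.Set.contains s x = false) : x ∉ s := by
  intro h; rw [(PySem.Set.contains_iff s x).2 h] at hc; cases hc

lemma pv_add_of_not_contains {s : PySem.Set String} {x : String}
    (h : PySem.Set.contains s x = false) : PySem.Set.add s x = s ++ [x] := by
  unfold PySem.Set.add; rw [h]; simp

-- weighted sum over a nodup list: removing one selected element
lemma pv_sum_filter_erase (w : String → Nat) (p : String → Bool) :
    ∀ (l : List String), l.Nodup → ∀ x ∈ l, p x = true →
      ((l.filter (fun u => p u && !(u == x))).map w).sum + w x = ((l.filter p).map w).sum := by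
  intro l
  induction l with
  | nil => intro _ x hx; simp at hx
  | cons h t ih =>
    intro hnd x hx hpx
    rcases List.mem_cons.1 hx with rfl | hxt
    · have hxt : x ∉ t := (List.nodup_cons.1 hnd).1
      have : List.filter (fun u => p u && !(u == x)) t = List.filter p t := by
        apply List.filter_congr
        intro u hu
        have : (u == x) = false := by
          simp only [beq_eq_false_iff_ne]; rintro rfl; exact hxt hu
        simp [this]
      simp [hpx, this]
      omega
    · have hne : (h == x) = false := by
        simp only [beq_eq_false_iff_ne]
        rintro rfl; exact (List.nodup_cons.1 hnd).1 hxt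
      have ih' := ih (List.nodup_cons.1 hnd).2 x hxt hpx
      by_cases hph : p h = true
      · simp [hph, hne]; omega
      · simp only [Bool.not_eq_true] at hph
        simp [hph, hne]; omega

lemma pv_countP_erase (p : String → Bool) :
    ∀ (l : List String), l.Nodup → ∀ x ∈ l, p x = true →
      l.countP (fun u => p u && !(u == x)) + 1 = l.countP p := by
  intro l
  induction l with
  | nil => intro _ x hx; simp at hx
  | cons h t ih =>
    intro hnd x hx hpx
    rcases List.mem_cons.1 hx with rfl | hxt
    · have hxt : x ∉ t := (List.nodup_cons.1 hnd).1
      have : t.countP (fun u => p u && !(u == x)) = t.countP p := by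
        apply List.countP_congr
        intro u hu
        have : (u == x) = false := by
          simp only [beq_eq_false_iff_ne]; rintro rfl; exact hxt hu
        simp [this]
      simp [hpx, this]
    · have hne : (h == x) = false := by
        simp only [beq_eq_false_iff_ne]
        rintro rfl; exact (List.nodup_cons.1 hnd).1 hxt
      have ih' := ih (List.nodup_cons.1 hnd).2 x hxt hpx
      simp [List.countP_cons, hne]
      omega

lemma pv_sum_filter_mono (w : String → Nat) (p q : String → Bool) :
    ∀ (l : List String), (∀ u ∈ l, p u = true → q u = true) →
      ((l.filter p).map w).sum ≤ ((l.filter q).map w).sum := by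
  intro l
  induction l with
  | nil => simp
  | cons h t ih =>
    intro hpq
    have ih' := ih (fun u hu => hpq u (List.mem_cons_of_mem _ hu))
    by_cases hph : p h = true
    · have hqh := hpq h (List.mem_cons_self) hph
      simp [hph, hqh]; omega
    · simp only [Bool.not_eq_true] at hph
      by_cases hqh : q h = true
      · simp [hph, hqh]; omega
      · simp only [Bool.not_eq_true] at hqh
        simp [hph, hqh]; omega

lemma pv_unseen_add {U : List String} (hU : U.Nodup) {x : String} (hx : x ∈ U)
    {s : PySem.Set String} (hc : PySem.Set.contains s x = false) :
    pvUnseen U (s ++ [x]) + 1 = pvUnseen U s := by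
  unfold pvUnseen
  have h1 : U.countP (fun u => !(PySem.Set.contains (s ++ [x]) u))
      = U.countP (fun u => (!(PySem.Set.contains s u)) && !(u == x)) := by
    apply List.countP_congr
    intro u _
    rw [pv_contains_append]
    cases hsu : PySem.Set.contains s u <;> cases hux : (u == x) <;> simp [hsu, hux]
  rw [h1]
  exact pv_countP_erase _ U hU x hx (by simp [pv_not_mem_of_contains_false hc])

lemma pv_unseen_mono {U : List String} {s t : PySem.Set String} (h : ∀ u, u ∈ s → u ∈ t) :
    pvUnseen U t ≤ pvUnseen U s := by
  apply List.countP_mono_left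
  intro u _ hu
  cases hsu : PySem.Set.contains s u
  · rfl
  · exact absurd ((PySem.Set.contains_iff t u).2 (h u ((PySem.Set.contains_iff s u).1 hsu)))
      (by simpa using hu)

lemma pv_budget_add (a : List (String × List String)) {x : String}
    {s : PySem.Set String} (hc : PySem.Set.contains s x = false) :
    pvBudget a (s ++ [x]) + (pvNbrs a x).length ≤ pvBudget a s := by
  unfold pvBudget
  have h1 : ((pvAdj a).keys).filter (fun k => !(PySem.Set.contains (s ++ [x]) k))
      = ((pvAdj a).keys).filter (fun k => (!(PySem.Set.contains s k)) && !(k == x)) := by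
    apply List.filter_congr
    intro u _
    rw [pv_contains_append]
    cases hsu : PySem.Set.contains s u <;> cases hux : (u == x) <;> simp [hsu, hux]
  rw [h1]
  by_cases hk : (pvAdj a).contains x = true
  · have hxk : x ∈ (pvAdj a).keys := (PySem.Dict.contains_iff_mem_keys _ _).1 hk
    have := pv_sum_filter_erase (fun k => (pvNbrs a k).length) (fun k => !(PySem.Set.contains s k))
      ((pvAdj a).keys) (PySem.Dict.nodup_keys_ofList a) x hxk
      (by simp [pv_not_mem_of_contains_false hc])
    beta_reduce at this
    omega
  · simp only [Bool.not_eq_true] at hk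
    have hnil : pvNbrs a x = [] := PySem.Dict.getD_of_not_contains _ _ hk
    rw [hnil]
    simp only [List.length_nil, Nat.add_zero]
    apply pv_sum_filter_mono
    intro u _ hu
    simp only [Bool.and_eq_true] at hu
    exact hu.1

-- elements of any neighbor list lie in the flattened value lists of the dict
lemma pv_nbrs_subset (a : List (String × List String)) (x : String) :
    ∀ y ∈ pvNbrs a x, y ∈ ((pvAdj a).values).flatten := by
  intro y hy
  by_cases hk : (pvAdj a).contains x = true
  · have hsome : ((pvAdj a).get? x).isSome := by
      rw [← PySem.Dict.contains_eq_isSome_get?]; exact hk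
    obtain ⟨v, hv⟩ := Option.isSome_iff_exists.1 hsome
    have hgetD : pvNbrs a x = v := by
      unfold pvNbrs; rw [PySem.Dict.getD_eq_get?_getD, hv]; rfl
    have hmemv : v ∈ (pvAdj a).values := by
      have hit := PySem.Dict.mem_items_of_get?_eq_some _ hv
      simp only [PySem.Dict.values]
      exact List.mem_map.2 ⟨(x, v), hit, rfl⟩
    exact List.mem_flatten.2 ⟨v, hmemv, hgetD ▸ hy⟩
  · simp only [Bool.not_eq_true] at hk
    have : pvNbrs a x = [] := PySem.Dict.getD_of_not_contains _ _ hk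
    rw [this] at hy; simp at hy

lemma pv_ofList_length_le (l : List String) : (PySem.Set.ofList l).length ≤ l.length := by
  have h : ∀ (l : List String) (s : PySem.Set String),
      (l.foldl PySem.Set.add s).length ≤ s.length + l.length := by
    intro l
    induction l with
    | nil => intro s; simp
    | cons y ys ih =>
      intro s
      have hadd : (PySem.Set.add s y).length ≤ s.length + 1 := by
        unfold PySem.Set.add
        split <;> simp
      calc ((y :: ys).foldl PySem.Set.add s).length = (ys.foldl PySem.Set.add (PySem.Set.add s y)).length := rfl
        _ ≤ (PySem.Set.add s y).length + ys.length := ih _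
        _ ≤ s.length + 1 + ys.length := by omega
        _ = s.length + (y :: ys).length := by simp; omega
  have := h l PySem.Set.empty
  rw [PySem.Set.ofList_eq_foldl]
  simpa [PySem.Set.empty] using this

lemma pv_visit_of_contains (a : List (String × List String)) (f : Nat) {x : String}
    {s : PySem.Set String} (h : PySem.Set.contains s x = true) : pvVisit a f x s = s := by
  have hx : x ∈ s := (PySem.Set.contains_iff s x).1 h
  cases f <;> simp [pvVisit, hx]

lemma pv_visit_not_contains (a : List (String × List String)) (f : Nat) {x : String}
    {s : PySem.Set String} (hc : PySem.Set.contains s x = false) :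
    pvVisit a (f + 1) x s = pvVisitList a f ((pvNbrs a x).reverse) (s ++ [x]) := by
  have hx : x ∉ s := pv_not_mem_of_contains_false hc
  simp [pvVisit, PySem.Set.add, hx]

-- B's helpers only extend the seen set (it is a prefix of the result)
lemma pv_visit_prefix (a : List (String × List String)) :
    ∀ f : Nat, (∀ x s, s <+: pvVisit a f x s) ∧ (∀ l s, s <+: pvVisitList a f l s) := by
  intro f
  induction f with
  | zero =>
    have hv : ∀ (x : String) (s : PySem.Set String), s <+: pvVisit a 0 x s := by
      intro x s; simp [pvVisit]
    refine ⟨hv, ?_⟩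
    intro l
    induction l with
    | nil => intro s; simp [pvVisitList]
    | cons y ys ih =>
      intro s
      rw [show pvVisitList a 0 (y :: ys) s = pvVisitList a 0 ys (pvVisit a 0 y s) by simp [pvVisitList]]
      exact (hv y s).trans (ih _)
  | succ f ihf =>
    have hv : ∀ (x : String) (s : PySem.Set String), s <+: pvVisit a (f+1) x s := by
      intro x s
      by_cases hc : PySem.Set.contains s x = true
      · rw [pv_visit_of_contains a _ hc]
      · simp only [Bool.not_eq_true] at hc
        rw [pv_visit_not_contains a f hc]
        exact (List.prefix_append s [x]).trans (ihf.2 _ _)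
    refine ⟨hv, ?_⟩
    intro l
    induction l with
    | nil => intro s; simp [pvVisitList]
    | cons y ys ih =>
      intro s
      rw [show pvVisitList a (f+1) (y :: ys) s = pvVisitList a (f+1) ys (pvVisit a (f+1) y s) by simp [pvVisitList]]
      exact (hv y s).trans (ih _)

lemma pv_visitList_append (a : List (String × List String)) (f : Nat) :
    ∀ (l1 l2 : List String) (s : PySem.Set String),
      pvVisitList a f (l1 ++ l2) s = pvVisitList a f l2 (pvVisitList a f l1 s) := by
  intro l1
  induction l1 with
  | nil => intro l2 s; simp [pvVisitList]
  | cons y ys ih => intro l2 s; simp only [List.cons_append, pvVisitList]; exact ih l2 _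

-- visiting already-seen elements is a no-op, so a filtered list visits the same set
lemma pv_visitList_filter (a : List (String × List String)) (f : Nat) (p : String → Bool) :
    ∀ (l : List String) (s : PySem.Set String), (∀ y ∈ l, p y = false → y ∈ s) →
      pvVisitList a f (l.filter p) s = pvVisitList a f l s := by
  intro l
  induction l with
  | nil => intro s _; simp
  | cons y ys ih =>
    intro s hmem
    by_cases hp : p y = true
    · rw [List.filter_cons_of_pos hp]
      rw [show pvVisitList a f (y :: ys.filter p) s = pvVisitList a f (ys.filter p) (pvVisit a f y s) by simp [pvVisitList]]
      rw [show pvVisitList a f (y :: ys) s = pvVisitList a f ys (pvVisit a f y s) by simp [pvVisitList]]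
      apply ih
      intro z hz hpz
      exact ((pv_visit_prefix a f).1 y s).subset (hmem z (List.mem_cons_of_mem _ hz) hpz)
    · simp only [Bool.not_eq_true] at hp
      rw [List.filter_cons_of_neg (by simp [hp])]
      rw [show pvVisitList a f (y :: ys) s = pvVisitList a f ys (pvVisit a f y s) by simp [pvVisitList]]
      rw [pv_visit_of_contains a f ((PySem.Set.contains_iff s y).2 (hmem y List.mem_cons_self hp))]
      exact ih s (fun z hz hpz => hmem z (List.mem_cons_of_mem _ hz) hpz)

-- fuel does not matter once it exceeds the number of unseen universe elements
lemma pv_fuel_irrel {a : List (String × List String)} {U : List String} (hU : U.Nodup)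
    (hvals : ∀ x, ∀ y ∈ pvNbrs a x, y ∈ U) :
    ∀ n : Nat, ∀ s : PySem.Set String, pvUnseen U s = n →
      (∀ x f g, x ∈ U → n + 1 ≤ f → n + 1 ≤ g → pvVisit a f x s = pvVisit a g x s) ∧
      (∀ l f g, (∀ y ∈ l, y ∈ U) → n + 1 ≤ f → n + 1 ≤ g →
        pvVisitList a f l s = pvVisitList a g l s) := by
  intro n
  induction n using Nat.strong_induction_on with
  | _ n IH =>
  intro s hs
  have hv : ∀ x f g, x ∈ U → n + 1 ≤ f → n + 1 ≤ g → pvVisit a f x s = pvVisit a g x s := by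
    intro x f g hx hf hg
    obtain ⟨f', rfl⟩ : ∃ f', f = f' + 1 := ⟨f - 1, by omega⟩
    obtain ⟨g', rfl⟩ : ∃ g', g = g' + 1 := ⟨g - 1, by omega⟩
    by_cases hc : PySem.Set.contains s x = true
    · rw [pv_visit_of_contains a _ hc, pv_visit_of_contains a _ hc]
    · simp only [Bool.not_eq_true] at hc
      rw [pv_visit_not_contains a f' hc, pv_visit_not_contains a g' hc]
      have hdec := pv_unseen_add hU hx hc (s := s)
      have hlt : pvUnseen U (s ++ [x]) < n := by omega
      exact (IH _ hlt _ rfl).2 ((pvNbrs a x).reverse) f' g'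
        (fun y hy => hvals x y (List.mem_reverse.1 hy)) (by omega) (by omega)
  refine ⟨hv, ?_⟩
  intro l
  induction l with
  | nil => intro f g _ _ _; simp [pvVisitList]
  | cons y ys ih =>
    intro f g hmem hf hg
    rw [show pvVisitList a f (y :: ys) s = pvVisitList a f ys (pvVisit a f y s) by simp [pvVisitList]]
    rw [show pvVisitList a g (y :: ys) s = pvVisitList a g ys (pvVisit a g y s) by simp [pvVisitList]]
    rw [hv y f g (hmem y List.mem_cons_self) hf hg]
    by_cases hc : PySem.Set.contains s y = true
    · rw [pv_visit_of_contains a _ hc]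
      exact ih f g (fun z hz => hmem z (List.mem_cons_of_mem _ hz)) hf hg
    · simp only [Bool.not_eq_true] at hc
      set s'' := pvVisit a g y s with hs''
      obtain ⟨g', rfl⟩ : ∃ g', g = g' + 1 := ⟨g - 1, by omega⟩
      have hpre : (s ++ [y]) <+: s'' := by
        rw [hs'', pv_visit_not_contains a g' hc]
        exact (pv_visit_prefix a g').2 _ _
      have hle : pvUnseen U s'' ≤ pvUnseen U (s ++ [y]) :=
        pv_unseen_mono (fun u hu => hpre.subset hu)
      have hdec := pv_unseen_add hU (hmem y List.mem_cons_self) hc (s := s)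
      have hlt : pvUnseen U s'' < n := by omega
      exact (IH _ hlt s'' rfl).2 ys f (g'+1)
        (fun z hz => hmem z (List.mem_cons_of_mem _ hz)) (by omega) (by omega)

-- the main bridge: A's worklist loop is B's recursive DFS over the reversed stack
lemma pv_loop_eq_visitList {a : List (String × List String)} {U : List String} (hU : U.Nodup)
    (hvals : ∀ x, ∀ y ∈ pvNbrs a x, y ∈ U) :
    ∀ n : Nat, ∀ (s : PySem.Set String) (st : List String) (f g : Nat),
      pvUnseen U s = n → (∀ x ∈ st, x ∈ U) →
      st.length + pvBudget a s ≤ f → n + 1 ≤ g →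
      pvLoopA a f s st = pvVisitList a g st.reverse s := by
  intro n
  induction n using Nat.strong_induction_on with
  | _ n IH =>
  intro s st
  induction st using List.reverseRecOn with
  | nil =>
    intro f g hs hmem hf hg
    cases f <;> simp [pvLoopA, pvVisitList, PySem.List.pop?]
  | append_singleton st' x ihst =>
    intro f g hs hmem hf hg
    simp only [List.length_append, List.length_cons, List.length_nil] at hf
    obtain ⟨f', rfl⟩ : ∃ f', f = f' + 1 := ⟨f - 1, by omega⟩
    obtain ⟨g', rfl⟩ : ∃ g', g = g' + 1 := ⟨g - 1, by omega⟩
    have hrev : (st' ++ [x]).reverse = x :: st'.reverse := by simp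
    have hxU : x ∈ U := hmem x (List.mem_append_right _ List.mem_cons_self)
    have hloop : pvLoopA a (f' + 1) s (st' ++ [x]) =
        (if PySem.Set.contains s x then pvLoopA a f' s st'
         else pvLoopA a f' (PySem.Set.add s x)
          ((pvNbrs a x).foldl (fun st y => if !(PySem.Set.contains (PySem.Set.add s x) y) then st ++ [y] else st) st')) := by
      simp only [pvLoopA, PySem.List.pop?_last]
    by_cases hc : PySem.Set.contains s x = true
    · rw [hloop, if_pos hc, hrev]
      rw [show pvVisitList a (g'+1) (x :: st'.reverse) s
          = pvVisitList a (g'+1) st'.reverse (pvVisit a (g'+1) x s) by simp [pvVisitList]]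
      rw [pv_visit_of_contains a _ hc]
      apply ihst f' (g'+1) hs (fun z hz => hmem z (List.mem_append_left _ hz)) _ hg
      omega
    · simp only [Bool.not_eq_true] at hc
      rw [hloop, if_neg (by simp only [Bool.not_eq_true]; exact hc), pv_add_of_not_contains hc]
      rw [PySem.List.foldl_append_if_eq_filter (fun y => !(PySem.Set.contains (s ++ [x]) y))]
      set pushed := (pvNbrs a x).filter (fun y => !(PySem.Set.contains (s ++ [x]) y)) with hpushed
      have hdec := pv_unseen_add hU hxU hc (s := s)
      have hlt : pvUnseen U (s ++ [x]) < n := by omega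
      have hbud := pv_budget_add a hc (s := s)
      have hpushlen : pushed.length ≤ (pvNbrs a x).length := List.length_filter_le _ _
      have hmem' : ∀ z ∈ st' ++ pushed, z ∈ U := by
        intro z hz
        rcases List.mem_append.1 hz with h1 | h2
        · exact hmem z (List.mem_append_left _ h1)
        · exact hvals x z (List.mem_of_mem_filter h2)
      have hLHS := IH _ hlt (s ++ [x]) (st' ++ pushed) f' (g'+1) rfl hmem'
        (by simp only [List.length_append]; omega) (by omega)
      rw [hLHS, hrev]
      rw [show pvVisitList a (g'+1) (x :: st'.reverse) s
          = pvVisitList a (g'+1) st'.reverse (pvVisit a (g'+1) x s) by simp [pvVisitList]]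
      rw [pv_visit_not_contains a g' hc]
      have hirr := (pv_fuel_irrel hU hvals _ (s ++ [x]) rfl).2 ((pvNbrs a x).reverse) g' (g'+1)
        (fun y hy => hvals x y (List.mem_reverse.1 hy)) (by omega) (by omega)
      rw [hirr]
      have hfilt : pvVisitList a (g'+1) ((pvNbrs a x).reverse) (s ++ [x])
          = pvVisitList a (g'+1) pushed.reverse (s ++ [x]) := by
        rw [hpushed, ← List.filter_reverse]
        rw [pv_visitList_filter a (g'+1) _ ((pvNbrs a x).reverse) (s ++ [x])]
        intro y _ hpy
        simp only [Bool.not_eq_eq_eq_not, Bool.not_false] at hpy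
        exact (PySem.Set.contains_iff _ y).1 hpy
      rw [hfilt]
      rw [show (st' ++ pushed).reverse = pushed.reverse ++ st'.reverse by simp]
      rw [pv_visitList_append]

lemma pv_dfs_equal (roots : List String) (a : List (String × List String)) :
    dfs_many_py roots a = dfs_many_py_alt roots a := by
  unfold dfs_many_py dfs_many_py_alt
  set U := PySem.Set.ofList (roots ++ ((pvAdj a).values).flatten) with hUdef
  have hU : U.Nodup := PySem.Set.nodup_ofList _
  have hvals : ∀ x, ∀ y ∈ pvNbrs a x, y ∈ U := by
    intro x y hy
    exact (PySem.Set.mem_ofList _ _).2 (List.mem_append_right _ (pv_nbrs_subset a x y hy))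
  have hempty : PySem.Set.contains (PySem.Set.empty (α := String)) = fun _ => false := by
    funext u; simp [PySem.Set.empty, PySem.Set.contains_eq_listContains]
  have hbud0 : pvBudget a PySem.Set.empty = (((pvAdj a).values).map List.length).sum := by
    unfold pvBudget
    rw [show (((pvAdj a).keys).filter (fun k => !(PySem.Set.contains PySem.Set.empty k))) = (pvAdj a).keys by
      rw [hempty]; simp]
    rw [PySem.Dict.values_eq_map_keys (pvAdj a) (PySem.Dict.nodup_keys_ofList a) []]
    rw [List.map_map]
    rfl
  have hun0 : pvUnseen U PySem.Set.empty = U.length := by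
    unfold pvUnseen; rw [hempty]; simp
  have hulen : U.length ≤ roots.length + (((pvAdj a).values).map List.length).sum := by
    calc U.length ≤ (roots ++ ((pvAdj a).values).flatten).length := pv_ofList_length_le _
      _ = roots.length + (((pvAdj a).values).map List.length).sum := by
          simp [List.length_append]
  apply pv_loop_eq_visitList hU hvals (pvUnseen U PySem.Set.empty) PySem.Set.empty roots
    (pvFuel roots a) (pvFuel roots a) rfl
  · intro r hr
    exact (PySem.Set.mem_ofList _ _).2 (List.mem_append_left _ hr)
  · unfold pvFuel; omega
  · unfold pvFuel; omega

-- ===== VERDICT (by name: the statement is the Claim_ definition above) =====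
theorem dfs_many_py_spec : Claim_equal_dfs_many_py := by
  intro roots a _
  unfold Spec_dfs_many_py
  exact pv_dfs_equal roots a
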